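-- pv_equiv track=rewrite | github.com/cs19d502/colab | pdf_to_st.py | split_rungs
-- ===== SOURCE A (Python) =====
-- from typing import List
--
-- def split_rungs(text: str) -> List[List[str]]:
--     """Split extracted text into rungs of instruction list lines."""
--     rungs: List[List[str]] = []
--     current: List[str] = []
--     for raw_line in text.splitlines():
--         line = raw_line.strip()
--         if not line:
--             if current:
--                 rungs.append(current)
--                 current = []
--             continue
--         if line.lower().startswith(("rung", "network")):
--             if current:
--                 rungs.append(current)
--                 current = []
--             continue
--         current.append(line)
--     if current:
--         rungs.append(current)
--     return rungs
-- ===== SOURCE B (Python) =====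
-- from typing import List
-- from itertools import groupby
--
-- def split_rungs(text: str) -> List[List[str]]:
--     """Split extracted text into rungs of instruction list lines."""
--     stripped = [line.strip() for line in text.splitlines()]
--     def is_sep(l: str) -> bool:
--         return (not l) or l.lower().startswith(("rung", "network"))
--     return [list(g) for k, g in groupby(stripped, key=is_sep) if not k]
-- ===== Notes on version B (the rewrite author's own statement) =====
-- stated objective: idiomatic
-- what changed: Replaced the explicit rungs/current accumulator state machine with a declarative pipeline: strip all lines, group maximal runs of equal separator-ness with itertools.groupby, and keep the non-separator runs.
import Mathlib
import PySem

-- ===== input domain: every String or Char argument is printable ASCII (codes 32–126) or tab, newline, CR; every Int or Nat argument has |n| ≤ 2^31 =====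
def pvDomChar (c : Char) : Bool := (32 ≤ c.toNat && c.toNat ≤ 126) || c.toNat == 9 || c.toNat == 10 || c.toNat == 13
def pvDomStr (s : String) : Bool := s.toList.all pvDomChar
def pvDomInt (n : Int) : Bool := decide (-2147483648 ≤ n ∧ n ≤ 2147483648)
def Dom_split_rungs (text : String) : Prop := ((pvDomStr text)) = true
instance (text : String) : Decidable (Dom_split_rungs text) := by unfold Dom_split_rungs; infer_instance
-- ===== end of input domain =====

-- B replaces A's flush-accumulator state machine by strip-all, group adjacent runs by
-- separator-ness (itertools.groupby), keep the non-separator runs; same result, same cost.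

-- ===== PORT A =====
def pvStepA (st : List (List String) × List String) (raw_line : String) :
    List (List String) × List String :=
  let line := PySem.Str.strip raw_line
  if line == "" then
    if !st.2.isEmpty then (st.1 ++ [st.2], []) else st
  else if PySem.Str.startswith (PySem.Str.lower line) "rung"
       || PySem.Str.startswith (PySem.Str.lower line) "network" then
    if !st.2.isEmpty then (st.1 ++ [st.2], []) else st
  else (st.1, st.2 ++ [line])

def split_rungs (text : String) : List (List String) :=
  let st := (PySem.Str.splitlines text).foldl pvStepA ([], [])
  if !st.2.isEmpty then st.1 ++ [st.2] else st.1

-- ===== PORT B =====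
def pvIsSep (l : String) : Bool :=
  l == "" || PySem.Str.startswith (PySem.Str.lower l) "rung"
          || PySem.Str.startswith (PySem.Str.lower l) "network"

-- port of itertools.groupby (key = pvIsSep): maximal runs of equal key
def pvGroupBy (ls : List String) : List (List String) :=
  match ls with
  | [] => []
  | a :: rest =>
    (a :: rest.takeWhile (fun b => pvIsSep b == pvIsSep a)) ::
      pvGroupBy (rest.dropWhile (fun b => pvIsSep b == pvIsSep a))
termination_by ls.length
decreasing_by
  simp only [List.length_cons]
  exact Nat.lt_succ_of_le (List.length_dropWhile_le _ _)

def split_rungs_alt (text : String) : List (List String) :=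
  let stripped := (PySem.Str.splitlines text).map PySem.Str.strip
  (pvGroupBy stripped).filter (fun g => match g with | [] => false | a :: _ => !pvIsSep a)

-- ===== PRECONDITION & SPEC =====
def Spec_split_rungs (text : String) (out : List (List String)) : Prop := out = split_rungs_alt text
instance (text : String) (out : List (List String)) : Decidable (Spec_split_rungs text out) := by unfold Spec_split_rungs; infer_instance

-- ===== CLAIM (what is proved, stated in full; the proofs are below) =====
def Claim_equal_split_rungs : Prop := ∀ (text : String), Dom_split_rungs text → Spec_split_rungs text (split_rungs text)

-- ===== LEMMAS AND PROOFS =====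

theorem pvDropWhileHead {α : Type} (p : α → Bool) :
    ∀ (l : List α) (b : α) (t : List α), l.dropWhile p = b :: t → p b = false := by
  intro l
  induction l with
  | nil => intro b t h; simp at h
  | cons c cs ih =>
    intro b t h
    by_cases hc : p c
    · rw [List.dropWhile_cons_of_pos hc] at h; exact ih b t h
    · rw [List.dropWhile_cons_of_neg hc] at h; cases h; simpa using hc

-- A re-expressed as structural recursion over the STRIPPED lines
def pvF (cur : List String) : List String → List (List String)
  | [] => if cur.isEmpty then [] else [cur]
  | l :: ls =>
    if pvIsSep l then (if cur.isEmpty then pvF [] ls else cur :: pvF [] ls)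
    else pvF (cur ++ [l]) ls

theorem pvStepA_eq (st : List (List String) × List String) (raw : String) :
    pvStepA st raw =
      (if pvIsSep (PySem.Str.strip raw) then
        (if st.2.isEmpty then st else (st.1 ++ [st.2], []))
      else (st.1, st.2 ++ [PySem.Str.strip raw])) := by
  simp only [pvStepA, pvIsSep, Bool.or_eq_true, beq_iff_eq]
  split_ifs with h1 h2 h3 h4 h5 h6 <;> simp_all

theorem foldl_eq_pvF (ls : List String) : ∀ (rungs : List (List String)) (cur : List String),
    (let st := ls.foldl pvStepA (rungs, cur)
     if !st.2.isEmpty then st.1 ++ [st.2] else st.1) = rungs ++ pvF cur (ls.map PySem.Str.strip) := by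
  induction ls with
  | nil =>
    intro rungs cur
    simp [pvF]
    by_cases h : cur.isEmpty <;> simp_all [List.isEmpty_iff]
  | cons a ls ih =>
    intro rungs cur
    simp only [List.foldl_cons, List.map_cons, pvF, pvStepA_eq]
    by_cases h : pvIsSep (PySem.Str.strip a)
    · by_cases hc : cur.isEmpty <;>
        simp_all [List.isEmpty_iff, List.append_assoc]
    · simp_all

theorem pvF_content (run : List String) : ∀ (cur : List String), cur ≠ [] →
    (∀ x ∈ run, pvIsSep x = false) → ∀ rest, pvF cur (run ++ rest) = pvF (cur ++ run) rest := by
  induction run with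
  | nil => intro cur _ _ rest; simp
  | cons a run ih =>
    intro cur hc hall rest
    have ha : pvIsSep a = false := hall a (by simp)
    simp only [List.cons_append, pvF, ha, Bool.false_eq_true, if_false]
    rw [ih (cur ++ [a]) (by simp) (fun x hx => hall x (by simp [hx])) rest]
    simp

theorem pvF_sep (run : List String) : (∀ x ∈ run, pvIsSep x = true) → ∀ rest,
    pvF [] (run ++ rest) = pvF [] rest := by
  induction run with
  | nil => intro _ rest; simp
  | cons a run ih =>
    intro hall rest
    have ha := hall a (by simp)
    simp only [List.cons_append, pvF, ha, if_true, List.isEmpty_nil]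
    exact ih (fun x hx => hall x (by simp [hx])) rest

theorem keep_groupBy_eq_pvF (n : Nat) : ∀ (ls : List String), ls.length ≤ n →
    (pvGroupBy ls).filter (fun g => match g with | [] => false | a :: _ => !pvIsSep a)
      = pvF [] ls := by
  induction n with
  | zero =>
    intro ls h
    have : ls = [] := List.eq_nil_of_length_eq_zero (Nat.le_zero.mp h)
    subst this; simp [pvGroupBy, pvF]
  | succ n ih =>
    intro ls h
    match ls with
    | [] => simp [pvGroupBy, pvF]
    | a :: rest =>
      rw [pvGroupBy]
      set p := fun b => pvIsSep b == pvIsSep a with hp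
      have hsplit : rest.takeWhile p ++ rest.dropWhile p = rest := List.takeWhile_append_dropWhile
      have hlen : (rest.dropWhile p).length ≤ n := by
        have := List.length_dropWhile_le p rest
        simp only [List.length_cons] at h; omega
      have htake : ∀ x ∈ rest.takeWhile p, pvIsSep x = pvIsSep a := by
        intro x hx
        have := List.mem_takeWhile_imp hx
        simpa [hp] using this
      by_cases ha : pvIsSep a
      · -- separator run: dropped by the filter; pvF [] skips it
        simp only [List.filter_cons, ha, Bool.not_true]
        have : pvF [] (a :: rest) = pvF [] (rest.dropWhile p) := by
          have : a :: rest = (a :: rest.takeWhile p) ++ rest.dropWhile p := by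
            simp [hsplit]
          rw [this]
          exact pvF_sep _ (by
            intro x hx
            rcases List.mem_cons.mp hx with h' | h'
            · subst h'; exact ha
            · rw [htake x h']; exact ha) _
        rw [this, ih _ hlen]; simp
      · -- content run: kept whole; pvF accumulates it
        simp only [List.filter_cons, ha, Bool.not_false]
        have hcontent : ∀ x ∈ a :: rest.takeWhile p, pvIsSep x = false := by
          intro x hx
          rcases List.mem_cons.mp hx with h' | h'
          · subst h'; simpa using ha
          · rw [htake x h']; simpa using ha
        have h1 : pvF [] (a :: rest) = pvF [a] (rest.takeWhile p ++ rest.dropWhile p) := by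
          rw [hsplit]
          simp [pvF, Bool.eq_false_iff.mpr ha]
        have h2 : pvF [a] (rest.takeWhile p ++ rest.dropWhile p)
            = pvF (a :: rest.takeWhile p) (rest.dropWhile p) := by
          have := pvF_content (rest.takeWhile p) [a] (by simp)
            (fun x hx => hcontent x (by simp [hx])) (rest.dropWhile p)
          simpa using this
        have h3 : pvF (a :: rest.takeWhile p) (rest.dropWhile p)
            = (a :: rest.takeWhile p) :: pvF [] (rest.dropWhile p) := by
          match hd : rest.dropWhile p with
          | [] => simp [pvF]
          | b :: t =>
            have hb : pvIsSep b ≠ pvIsSep a := by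
              have := pvDropWhileHead p rest b t hd
              simpa [hp] using this
            have hbs : pvIsSep b = true := by
              have ha' : pvIsSep a = false := by simpa using ha
              cases hba : pvIsSep b
              · exact absurd (hba.trans ha'.symm) hb
              · rfl
            simp [pvF, hbs]
        rw [h1, h2, h3, ih _ hlen]; simp

-- ===== VERDICT (by name: the statement is the Claim_ definition above) =====
theorem split_rungs_spec : Claim_equal_split_rungs := by
  intro text _
  unfold Spec_split_rungs split_rungs split_rungs_alt
  rw [keep_groupBy_eq_pvF ((PySem.Str.splitlines text).map PySem.Str.strip).length _ le_rfl]
  have := foldl_eq_pvF (PySem.Str.splitlines text) [] []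
  simpa using this
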